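-- pv_equiv track=rewrite | github.com/reeceyang/adventofcode2020 | day14/sol2.py | search
-- ===== SOURCE A (Python) =====
-- def search(address, j):
--     all = []
--     no_x = True
--     for i in range(j, 36):
--         if address[i] == "X":
--             no_x = False
--             all = all + search(address[:i] + "1" + address[i + 1:], i) + search(address[:i] + "0" + address[i + 1:], i)
--             break #optimize
--     if no_x:
--         all.append(address)
--     return all
-- ===== SOURCE B (Python) =====
-- def search(address, j):
--     xs = [i for i in range(j, 36) if address[i] == "X"]
--     results = [address]
--     for i in reversed(xs):
--         results = [r[:i] + "1" + r[i + 1:] for r in results] + \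
--                   [r[:i] + "0" + r[i + 1:] for r in results]
--     return results
-- ===== Notes on version B (the rewrite author's own statement) =====
-- stated objective: simpler
-- what changed: A's branch-and-recurse on the first 'X' (rebuilding the string and concatenating recursive results) is replaced by a non-recursive breadth-wise expansion: collect all 'X' positions once, then double the result list per position (processed right-to-left, '1' half before '0' half), which reproduces A's exact enumeration order.
import Mathlib
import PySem

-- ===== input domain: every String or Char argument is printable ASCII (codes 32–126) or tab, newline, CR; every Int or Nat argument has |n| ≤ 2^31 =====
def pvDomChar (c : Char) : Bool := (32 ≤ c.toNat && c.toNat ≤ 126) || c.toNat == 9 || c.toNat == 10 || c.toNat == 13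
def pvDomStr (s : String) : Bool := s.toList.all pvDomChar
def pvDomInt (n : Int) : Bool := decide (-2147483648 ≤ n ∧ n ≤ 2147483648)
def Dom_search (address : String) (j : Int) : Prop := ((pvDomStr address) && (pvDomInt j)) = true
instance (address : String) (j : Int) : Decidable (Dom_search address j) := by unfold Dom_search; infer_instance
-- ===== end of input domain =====

-- B replaces A's branch-and-recurse on the first 'X' by a non-recursive breadth-wise expansion
-- over all 'X' positions (simpler; same enumeration order).

-- shared helper of both sources: the test  address[i] == "X"
def pX (cs : List Char) (i : Int) : Bool := PySem.List.pyGet? cs i == some 'X'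

-- shared helper of both sources: the expression  s[:i] + c + s[i+1:]
def setAt (cs : List Char) (i : Int) (c : Char) : List Char :=
  PySem.List.slice cs none (some i) ++ [c] ++ PySem.List.slice cs (some (i + 1)) none

-- ===== PORT A =====
-- A's for-loop with its break: first index i of range(j, 36) with address[i] == 'X'
-- (an index Python would raise IndexError on is treated as a non-match; Pre_ excludes those inputs)
def findX : List Int → List Char → Option Int
  | [], _ => none
  | i :: rest, cs => if pX cs i then some i else findX rest cs

-- fuel is only a totality guard: under Pre_search the recursion depth is at most
-- 1 + number of 'X' positions in [j, 36) ≤ 37, so fuel 37 is never exhausted there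
def searchGo : Nat → List Char → Int → List (List Char)
  | 0, _, _ => []
  | n + 1, cs, j =>
    match findX (PySem.List.pyRange j 36 1) cs with
    | none => [cs]
    | some i => searchGo n (setAt cs i '1') i ++ searchGo n (setAt cs i '0') i

def search (address : String) (j : Int) : List String :=
  (searchGo 37 address.toList j).map String.ofList

-- ===== PORT B =====
-- the loop body of Source B: double the result list at position i, '1' half first
def stepF (res : List (List Char)) (i : Int) : List (List Char) :=
  res.map (fun r => setAt r i '1') ++ res.map (fun r => setAt r i '0')

def search_alt (address : String) (j : Int) : List String :=
  let cs := address.toList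
  let xs := (PySem.List.pyRange j 36 1).filter (pX cs)
  (xs.reverse.foldl stepF [cs]).map String.ofList

-- ===== PRECONDITION & SPEC =====
-- Pre_ excludes negative j (Python's negative-index wraparound then reads characters from the
-- string's end, and A's and B's values there are accidental artefacts of their structure) and
-- the inputs where A raises IndexError (j < 36 with a string shorter than 36) or recurses forever.
def Pre_search (address : String) (j : Int) : Prop :=
  36 ≤ j ∨ (0 ≤ j ∧ 36 ≤ address.toList.length)
instance (address : String) (j : Int) : Decidable (Pre_search address j) := by
  unfold Pre_search; infer_instance

def pvWitness_search : String × Int := ("00X000000000000000000000000000000000", 0)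

def Spec_search (address : String) (j : Int) (out : List String) : Prop := out = search_alt address j
instance (address : String) (j : Int) (out : List String) : Decidable (Spec_search address j out) := by
  unfold Spec_search; infer_instance

-- ===== CLAIM (what is proved, stated in full; the proofs are below) =====
def Claim_equal_search : Prop := ∀ (address : String) (j : Int),
  Dom_search address j → Pre_search address j → Spec_search address j (search address j)

-- ===== LEMMAS AND PROOFS =====

-- the list of 'X' positions that drives both programs
def xsOf (cs : List Char) (j : Int) : List Int :=
  (PySem.List.pyRange j 36 1).filter (pX cs)

theorem findX_eq_find? (l : List Int) (cs : List Char) :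
    findX l cs = l.find? (pX cs) := by
  induction l with
  | nil => rfl
  | cons i rest ih =>
    simp only [findX, List.find?]
    cases h : pX cs i <;> simp [ih]

theorem setAt_eq_set (cs : List Char) (i : Int) (c : Char)
    (h0 : 0 ≤ i) (hlt : i.toNat < cs.length) :
    setAt cs i c = cs.set i.toNat c := by
  have h1 : (i + 1 : Int).toNat = i.toNat + 1 := by omega
  rw [setAt, PySem.List.slice_to cs h0, PySem.List.slice_from cs (by omega), h1,
      List.set_eq_take_cons_drop c hlt, List.append_assoc]
  rfl

theorem length_setAt (cs : List Char) (i : Int) (c : Char)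
    (h0 : 0 ≤ i) (hlt : i.toNat < cs.length) :
    (setAt cs i c).length = cs.length := by
  rw [setAt_eq_set cs i c h0 hlt, List.length_set]

-- every list produced by the fold keeps the common length
theorem foldl_stepF_length (L : Nat) (ys : List Int)
    (hys : ∀ t ∈ ys, 0 ≤ t ∧ t.toNat < L) :
    ∀ res : List (List Char), (∀ r ∈ res, r.length = L) →
      ∀ r ∈ ys.foldl stepF res, r.length = L := by
  induction ys with
  | nil => intro res hres; simpa using hres
  | cons t ys ih =>
    intro res hres
    simp only [List.foldl_cons]
    refine ih (fun u hu => hys u (List.mem_cons_of_mem _ hu)) _ ?_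
    intro r hr
    obtain ⟨h0t, hltt⟩ := hys t List.mem_cons_self
    rcases List.mem_append.mp hr with hr | hr <;>
      · obtain ⟨q, hq, rfl⟩ := List.mem_map.mp hr
        rw [length_setAt q t _ h0t (by rw [hres q hq]; exact hltt)]
        exact hres q hq

-- a set at a position no later step touches commutes with the whole fold
theorem foldl_stepF_map_set (L : Nat) (i : Int) (c : Char) (h0 : 0 ≤ i)
    (ys : List Int) (hys : ∀ t ∈ ys, 0 ≤ t ∧ t.toNat < L ∧ t ≠ i) :
    ∀ res : List (List Char), (∀ r ∈ res, r.length = L) →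
      ys.foldl stepF (res.map (fun r => r.set i.toNat c)) =
        (ys.foldl stepF res).map (fun r => r.set i.toNat c) := by
  induction ys with
  | nil => intro res _; simp
  | cons t ys ih =>
    intro res hres
    obtain ⟨h0t, hltt, htne⟩ := hys t List.mem_cons_self
    have hcomm : ∀ (b : Char) (q : List Char), q ∈ res →
        setAt (q.set i.toNat c) t b = (setAt q t b).set i.toNat c := by
      intro b q hq
      have hqL : q.length = L := hres q hq
      have hne : t.toNat ≠ i.toNat := by omega
      rw [setAt_eq_set _ t b h0t (by rw [List.length_set, hqL]; exact hltt),
          setAt_eq_set q t b h0t (by rw [hqL]; exact hltt),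
          List.set_comm _ _ hne.symm]
    have hkey : stepF (res.map (fun r => r.set i.toNat c)) t =
        (stepF res t).map (fun r => r.set i.toNat c) := by
      simp only [stepF, List.map_map, List.map_append]
      congr 1 <;> exact List.map_congr_left (fun q hq => hcomm _ q hq)
    simp only [List.foldl_cons, hkey]
    refine ih (fun u hu => hys u (List.mem_cons_of_mem _ hu)) (stepF res t) ?_
    intro r hr
    rcases List.mem_append.mp hr with hr | hr <;>
      · obtain ⟨q, hq, rfl⟩ := List.mem_map.mp hr
        rw [length_setAt q t _ h0t (by rw [hres q hq]; exact hltt)]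
        exact hres q hq

-- head of xsOf: bounds, match, and the shape of the tail
theorem xsOf_cons_elim (cs : List Char) (j i : Int) (rest : List Int)
    (h : xsOf cs j = i :: rest) :
    j ≤ i ∧ i < 36 ∧ pX cs i = true ∧
      rest = (PySem.List.pyRange (i + 1) 36 1).filter (pX cs) := by
  have hmem := List.mem_filter.mp (h ▸ List.mem_cons_self)
  obtain ⟨hji, hi36⟩ := PySem.List.mem_pyRange_one.mp hmem.1
  refine ⟨hji, hi36, hmem.2, ?_⟩
  have hsp : PySem.List.pyRange j 36 1 = PySem.List.pyRange j i 1 ++ PySem.List.pyRange i 36 1 :=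
    PySem.List.pyRange_one_append j i 36 hji (le_of_lt hi36)
  rw [xsOf, hsp, List.filter_append] at h
  cases hA : (PySem.List.pyRange j i 1).filter (pX cs) with
  | cons a l =>
    exfalso
    rw [hA] at h
    have ha : a = i := ((List.cons.injEq _ _ _ _).mp h).1
    have := PySem.List.mem_pyRange_one.mp (List.mem_of_mem_filter (hA ▸ List.mem_cons_self))
    omega
  | nil =>
    rw [hA, List.nil_append, PySem.List.pyRange_one_cons hi36, List.filter_cons, hmem.2] at h
    simpa using ((List.cons.injEq _ _ _ _).mp h).2.symm

-- replacing the found 'X' makes the child's position list the parent's tail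
theorem xsOf_setAt (cs : List Char) (j i : Int) (rest : List Int) (c : Char) (hc : c ≠ 'X')
    (h0 : 0 ≤ i) (hlt : i.toNat < cs.length) (h : xsOf cs j = i :: rest) :
    xsOf (setAt cs i c) i = rest := by
  obtain ⟨hji, hi36, hXi, hrest⟩ := xsOf_cons_elim cs j i rest h
  rw [xsOf, PySem.List.pyRange_one_cons hi36, List.filter_cons]
  have hpXfalse : pX (setAt cs i c) i = false := by
    rw [pX, setAt_eq_set cs i c h0 hlt, PySem.List.pyGet?_of_nonneg _ h0,
        List.getElem?_set_self hlt]
    simpa using hc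
  rw [hpXfalse]
  simp only [Bool.false_eq_true, if_false]
  rw [hrest]
  refine List.filter_congr ?_
  intro t ht
  obtain ⟨hit, ht36⟩ := PySem.List.mem_pyRange_one.mp ht
  rw [pX, pX, setAt_eq_set cs i c h0 hlt, PySem.List.pyGet?_of_nonneg _ (by omega),
      PySem.List.pyGet?_of_nonneg _ (by omega), List.getElem?_set_ne (by omega)]

theorem searchGo_eq_fold (n : Nat) : ∀ (cs : List Char) (j : Int),
    0 ≤ j → 36 ≤ cs.length → (xsOf cs j).length < n →
    searchGo n cs j = (xsOf cs j).reverse.foldl stepF [cs] := by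
  induction n with
  | zero => intro cs j _ _ hlt; omega
  | succ n ih =>
    intro cs j hj hL hlt
    simp only [searchGo]
    have hfind : findX (PySem.List.pyRange j 36 1) cs = (xsOf cs j).head? := by
      rw [findX_eq_find?, ← List.head?_filter]; rfl
    cases hxs : xsOf cs j with
    | nil => rw [hfind, hxs]; simp
    | cons i rest =>
      obtain ⟨hji, hi36, hXi, hrest⟩ := xsOf_cons_elim cs j i rest hxs
      have h0i : 0 ≤ i := le_trans hj hji
      have hltL : i.toNat < cs.length := by omega
      have hbound : ∀ t ∈ rest.reverse, 0 ≤ t ∧ t.toNat < cs.length ∧ t ≠ i := by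
        intro t ht
        have := PySem.List.mem_pyRange_one.mp
          (List.mem_of_mem_filter (hrest ▸ List.mem_reverse.mp ht))
        exact ⟨by omega, by omega, by omega⟩
      have hchild : ∀ c : Char, c ≠ 'X' →
          searchGo n (setAt cs i c) i =
            (rest.reverse.foldl stepF [cs]).map (fun r => r.set i.toNat c) := by
        intro c hc
        rw [ih (setAt cs i c) i h0i (by rw [length_setAt cs i c h0i hltL]; exact hL)
              (by rw [xsOf_setAt cs j i rest c hc h0i hltL hxs]
                  have hlen' : (xsOf cs j).length < n + 1 := hlt
                  rw [hxs] at hlen'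
                  simpa using hlen'),
            xsOf_setAt cs j i rest c hc h0i hltL hxs]
        have hsingle : [setAt cs i c] = [cs].map (fun r => r.set i.toNat c) := by
          simp [setAt_eq_set cs i c h0i hltL]
        rw [hsingle,
            foldl_stepF_map_set cs.length i c h0i rest.reverse hbound [cs] (by simp)]
      rw [hfind, hxs]
      simp only [List.head?_cons]
      rw [hchild '1' (by decide), hchild '0' (by decide), List.reverse_cons, List.foldl_append,
          List.foldl_cons, List.foldl_nil]
      have hRlen : ∀ r ∈ rest.reverse.foldl stepF [cs], r.length = cs.length :=
        foldl_stepF_length cs.length rest.reverse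
          (fun t ht => ⟨(hbound t ht).1, (hbound t ht).2.1⟩) [cs] (by simp)
      rw [stepF]
      congr 1 <;>
        · refine (List.map_congr_left ?_).symm
          intro r hr
          exact setAt_eq_set r i _ h0i (by rw [hRlen r hr]; exact hltL)

-- ===== VERDICT (by name: the statement is the Claim_ definition above) =====
theorem search_spec : Claim_equal_search := by
  intro address j _ hpre
  unfold Spec_search search search_alt
  rcases hpre with h36 | ⟨hj, hL⟩
  · have hempty : PySem.List.pyRange j 36 1 = [] := by
      rw [PySem.List.pyRange_one]
      have h0 : (36 - j).toNat = 0 := by omega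
      simp [h0]
    have h37 : (37 : Nat) = 36 + 1 := by norm_num
    rw [h37]
    simp [searchGo, hempty, findX]
  · have hlen : (xsOf address.toList j).length < 37 := by
      have h1 := List.length_filter_le (pX address.toList) (PySem.List.pyRange j 36 1)
      have h2 := PySem.List.length_pyRange_one j 36
      rw [xsOf]
      omega
    rw [searchGo_eq_fold 37 address.toList j hj hL hlen]
    rfl
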